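-- pv_equiv track=rewrite | github.com/Jianquan-Zhang/table_dataset_generate | Utils.py | pointMap
-- ===== SOURCE A (Python) =====
-- def pointMap(points):
--     heightKeys = []
--     heightMap = {}
--     widthKeys = []
--     widthMap = {}
--     for p in points:
--         if p[0] in heightMap:
--             heightMap[p[0]].append(p[1])
--         else:
--             heightMap[p[0]] = [p[1]]
--             heightKeys.append(p[0])
--         if p[1] in widthMap:
--             widthMap[p[1]].append(p[0])
--         else:
--             widthMap[p[1]] = [p[0]]
--             widthKeys.append(p[1])
--     heightKeys.sort()
--     widthKeys.sort()
--     for k in heightKeys: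
--         heightMap[k].sort()
--     for k in widthKeys:
--         widthMap[k].sort()
--
--     return heightMap, heightKeys, widthMap, widthKeys
-- ===== SOURCE B (Python) =====
-- def pointMap(points):
--     # Build each group by filtering the point list per distinct key (no mutable dict-of-lists bookkeeping).
--     xs = list(dict.fromkeys(p[0] for p in points))
--     ys = list(dict.fromkeys(p[1] for p in points))
--     heightMap = {x: sorted(p[1] for p in points if p[0] == x) for x in xs}
--     widthMap = {y: sorted(p[0] for p in points if p[1] == y) for y in ys}
--     return heightMap, sorted(xs), widthMap, sorted(ys)
-- ===== Notes on version B (the rewrite author's own statement) =====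
-- stated objective: alternative
-- what changed: Instead of one mutating pass maintaining two dicts of growing lists plus separate key lists followed by in-place sorts, B computes the distinct keys once (dict.fromkeys) and builds each map by a per-key filter comprehension with sorted(), deriving the key lists from the maps.
import Mathlib
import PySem

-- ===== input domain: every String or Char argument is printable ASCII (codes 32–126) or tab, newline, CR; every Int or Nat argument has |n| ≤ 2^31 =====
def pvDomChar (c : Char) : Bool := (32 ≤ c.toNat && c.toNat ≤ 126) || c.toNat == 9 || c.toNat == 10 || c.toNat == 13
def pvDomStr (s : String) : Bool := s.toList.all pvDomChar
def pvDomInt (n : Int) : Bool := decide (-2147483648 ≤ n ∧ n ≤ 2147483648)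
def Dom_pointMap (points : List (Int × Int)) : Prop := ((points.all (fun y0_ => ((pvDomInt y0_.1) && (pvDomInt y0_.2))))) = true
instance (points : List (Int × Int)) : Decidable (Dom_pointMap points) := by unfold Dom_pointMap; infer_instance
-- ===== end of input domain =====

-- B builds each map by per-key filtering over distinct keys instead of A's mutating dict-of-lists pass; alternative decomposition, same results.

-- ===== PORT A =====
-- one loop step of A's 'for p in points' (updates heightMap/heightKeys/widthMap/widthKeys)
def pointMapStep (st : PySem.Dict Int (List Int) × List Int × PySem.Dict Int (List Int) × List Int)
    (p : Int × Int) : PySem.Dict Int (List Int) × List Int × PySem.Dict Int (List Int) × List Int :=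
  let (hm, hk, wm, wk) := st
  let (hm, hk) := if hm.contains p.1 then (hm.modify p.1 [] (fun l => l ++ [p.2]), hk)
                  else (hm.insert p.1 [p.2], hk ++ [p.1])
  let (wm, wk) := if wm.contains p.2 then (wm.modify p.2 [] (fun l => l ++ [p.1]), wk)
                  else (wm.insert p.2 [p.1], wk ++ [p.2])
  (hm, hk, wm, wk)

def pointMap (points : List (Int × Int)) : (List (Int × List Int)) × List Int × (List (Int × List Int)) × List Int :=
  let st := points.foldl pointMapStep (PySem.Dict.empty, [], PySem.Dict.empty, [])
  let heightKeys := PySem.List.sorted st.2.1 (fun x => x) false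
  let widthKeys := PySem.List.sorted st.2.2.2 (fun x => x) false
  let heightMap := heightKeys.foldl (fun d k => d.modify k [] (fun l => PySem.List.sorted l (fun v => v) false)) st.1
  let widthMap := widthKeys.foldl (fun d k => d.modify k [] (fun l => PySem.List.sorted l (fun v => v) false)) st.2.2.1
  (heightMap.items, heightKeys, widthMap.items, widthKeys)

-- ===== PORT B =====
def pointMap_alt (points : List (Int × Int)) : (List (Int × List Int)) × List Int × (List (Int × List Int)) × List Int :=
  let xs := PySem.List.dedup (points.map (fun p => p.1))
  let ys := PySem.List.dedup (points.map (fun p => p.2))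
  let heightMap := xs.map (fun x => (x, PySem.List.sorted ((points.filter (fun p => p.1 == x)).map (fun p => p.2)) (fun v => v) false))
  let widthMap := ys.map (fun y => (y, PySem.List.sorted ((points.filter (fun p => p.2 == y)).map (fun p => p.1)) (fun v => v) false))
  (heightMap, PySem.List.sorted xs (fun x => x) false, widthMap, PySem.List.sorted ys (fun x => x) false)

-- ===== PRECONDITION & SPEC =====
def Spec_pointMap (points : List (Int × Int)) (out : (List (Int × List Int)) × List Int × (List (Int × List Int)) × List Int) : Prop := out = pointMap_alt points
instance (points : List (Int × Int)) (out : (List (Int × List Int)) × List Int × (List (Int × List Int)) × List Int) : Decidable (Spec_pointMap points out) := by unfold Spec_pointMap; infer_instance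

-- ===== CLAIM (what is proved, stated in full; the proofs are below) =====
def Claim_equal_pointMap : Prop := ∀ (points : List (Int × Int)), Dom_pointMap points → Spec_pointMap points (pointMap points)

-- ===== LEMMAS AND PROOFS =====

-- the (map, keys) half-step A performs on one side
def halfStep (dk : PySem.Dict Int (List Int) × List Int) (p : Int × Int) : PySem.Dict Int (List Int) × List Int :=
  if dk.1.contains p.1 then (dk.1.modify p.1 [] (fun l => l ++ [p.2]), dk.2)
  else (dk.1.insert p.1 [p.2], dk.2 ++ [p.1])

-- A's fold is the two half-folds run side by side
theorem foldl_pointMapStep_eq (l : List (Int × Int))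
    (hm : PySem.Dict Int (List Int)) (hk : List Int) (wm : PySem.Dict Int (List Int)) (wk : List Int) :
    l.foldl pointMapStep (hm, hk, wm, wk) =
      ((l.foldl halfStep (hm, hk)).1, (l.foldl halfStep (hm, hk)).2,
       ((l.map Prod.swap).foldl halfStep (wm, wk)).1, ((l.map Prod.swap).foldl halfStep (wm, wk)).2) := by
  induction l generalizing hm hk wm wk with
  | nil => rfl
  | cons p t ih =>
    simp only [List.foldl_cons, List.map_cons]
    rw [show pointMapStep (hm, hk, wm, wk) p =
        ((halfStep (hm, hk) p).1, (halfStep (hm, hk) p).2,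
         (halfStep (wm, wk) p.swap).1, (halfStep (wm, wk) p.swap).2) from by
      simp only [pointMapStep, halfStep, Prod.swap]]
    exact ih _ _ _ _

def gather (l : List (Int × Int)) (x : Int) : List Int := (l.filter (fun q => q.1 == x)).map (fun q => q.2)

def grp (l : List (Int × Int)) : List (Int × List Int) :=
  (PySem.List.dedup (l.map (fun p => p.1))).map (fun x => (x, gather l x))

theorem gather_append_singleton (l : List (Int × Int)) (p : Int × Int) (x : Int) :
    gather (l ++ [p]) x = gather l x ++ (if p.1 = x then [p.2] else []) := by
  simp only [gather, List.filter_append, List.map_append]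
  by_cases h : p.1 = x <;> simp [h]

theorem gather_eq_nil_of_not_mem (l : List (Int × Int)) (x : Int) (h : x ∉ l.map (fun p => p.1)) :
    gather l x = [] := by
  simp only [gather, List.map_eq_nil_iff, List.filter_eq_nil_iff]
  intro q hq
  simp only [beq_iff_eq]
  intro he
  exact h (List.mem_map.mpr ⟨q, hq, he⟩)

theorem keys_grp (l : List (Int × Int)) :
    (PySem.Dict.mk (grp l)).keys = PySem.List.dedup (l.map (fun p => p.1)) := by
  simp [grp, PySem.Dict.keys_mk, List.map_map, Function.comp_def]

-- invariant of A's per-side loop: the dict holds, per first-occurrence key, the values gathered so far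
theorem halfStep_fold (l : List (Int × Int)) :
    l.foldl halfStep (PySem.Dict.empty, []) =
      (PySem.Dict.mk (grp l), PySem.List.dedup (l.map (fun p => p.1))) := by
  induction l using List.reverseRecOn with
  | nil => rfl
  | append_singleton t p ih =>
    rw [List.foldl_append, ih]
    have hkeys := keys_grp t
    have hnd : (PySem.Dict.mk (grp t)).keys.Nodup := by rw [hkeys]; exact PySem.List.nodup_dedup _
    simp only [List.foldl_cons, List.foldl_nil, halfStep]
    have hcont : (PySem.Dict.mk (grp t)).contains p.1 = decide (p.1 ∈ t.map (fun p => p.1)) := by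
      rw [PySem.Dict.contains_eq_decide_mem_keys, hkeys]
      simp
    by_cases hmem : p.1 ∈ t.map (fun q => q.1)
    · -- existing key: modify appends p.2 to its group
      rw [hcont]
      simp only [hmem, decide_true, if_true]
      have hget : (PySem.Dict.mk (grp t)).getD p.1 [] = gather t p.1 := by
        exact PySem.Dict.getD_of_mem_items _
          (show (p.1, gather t p.1) ∈ grp t from
            List.mem_map.mpr ⟨p.1, by simpa using hmem, rfl⟩) hnd []
      have hc : (PySem.Dict.mk (grp t)).contains p.1 = true := by
        rw [hcont]; simpa using hmem
      refine Prod.ext ?_ ?_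
      · show (PySem.Dict.mk (grp t)).modify p.1 [] (fun l => l ++ [p.2]) = PySem.Dict.mk (grp (t ++ [p]))
        apply PySem.Dict.ext
        rw [PySem.Dict.modify, hget, PySem.Dict.items_insert_of_contains _ _ hc]
        show (grp t).map _ = grp (t ++ [p])
        simp only [grp, List.map_append, List.map_cons, List.map_nil,
          PySem.List.dedup_eq_ofList, PySem.Set.ofList_append_singleton, List.map_map]
        rw [PySem.Set.add_of_mem ((PySem.Set.mem_ofList _ _).mpr hmem)]
        apply List.map_congr_left
        intro x hx
        simp only [Function.comp_apply, gather_append_singleton]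
        by_cases he : p.1 = x
        · subst he; simp
        · simp only [beq_iff_eq, if_neg (fun h : x = p.1 => he h.symm), if_neg he, List.append_nil]
      · show (PySem.List.dedup (t.map fun p => p.1)) = PySem.List.dedup ((t ++ [p]).map fun p => p.1)
        simp only [List.map_append, List.map_cons, List.map_nil, PySem.List.dedup_eq_ofList,
          PySem.Set.ofList_append_singleton]
        rw [PySem.Set.add_of_mem ((PySem.Set.mem_ofList _ _).mpr hmem)]
    · -- new key: append a fresh singleton group and record the key
      rw [hcont]
      simp only [hmem, decide_false]
      have hc : (PySem.Dict.mk (grp t)).contains p.1 = false := by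
        rw [hcont]; simpa using hmem
      refine Prod.ext ?_ ?_
      · show (PySem.Dict.mk (grp t)).insert p.1 [p.2] = PySem.Dict.mk (grp (t ++ [p]))
        apply PySem.Dict.ext
        rw [PySem.Dict.items_insert_of_not_contains _ _ hc]
        show grp t ++ [(p.1, [p.2])] = grp (t ++ [p])
        simp only [grp, List.map_append, List.map_cons, List.map_nil,
          PySem.List.dedup_eq_ofList, PySem.Set.ofList_append_singleton]
        rw [PySem.Set.add_of_not_mem (fun h => hmem ((PySem.Set.mem_ofList _ _).mp h)), List.map_append]
        congr 1
        · apply List.map_congr_left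
          intro x hx
          have hxne : p.1 ≠ x := by
            intro he; subst he
            exact hmem (by simpa [PySem.Set.mem_ofList] using hx)
          rw [gather_append_singleton]
          simp [hxne]
        · simp only [List.map_cons, List.map_nil, gather_append_singleton,
            gather_eq_nil_of_not_mem t p.1 hmem]
          simp
      · show (PySem.List.dedup (t.map fun p => p.1)) ++ [p.1] = PySem.List.dedup ((t ++ [p]).map fun p => p.1)
        simp only [List.map_append, List.map_cons, List.map_nil, PySem.List.dedup_eq_ofList,
          PySem.Set.ofList_append_singleton]
        rw [PySem.Set.add_of_not_mem (fun h => hmem ((PySem.Set.mem_ofList _ _).mp h))]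

-- folding 'd[k].sort()' over distinct existing keys sorts exactly those entries
theorem foldl_modify_sort (ks : List Int) :
    ∀ (d : PySem.Dict Int (List Int)), d.keys.Nodup → ks.Nodup → (∀ k ∈ ks, k ∈ d.keys) →
    (ks.foldl (fun d k => d.modify k [] (fun l => PySem.List.sorted l (fun v => v) false)) d).items =
      d.items.map (fun q => if q.1 ∈ ks then (q.1, PySem.List.sorted q.2 (fun v => v) false) else q) := by
  induction ks with
  | nil => intro d _ _ _; simp
  | cons k t ih =>
    intro d hnd hksnd hsub
    have hk : k ∈ d.keys := hsub k (List.mem_cons_self ..)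
    have hc : d.contains k = true := (PySem.Dict.contains_iff_mem_keys _ _).mpr hk
    obtain ⟨v, hv⟩ : ∃ v, (k, v) ∈ d.items := by
      obtain ⟨q, hq, hq1⟩ := List.mem_map.mp hk
      exact ⟨q.2, by rwa [show (k, q.2) = q from by rw [← hq1]]⟩
    have hget : d.getD k [] = v := PySem.Dict.getD_of_mem_items _ hv hnd []
    set d' := d.modify k [] (fun l => PySem.List.sorted l (fun v => v) false) with hd'
    have hitems' : d'.items = d.items.map (fun q => if q.1 == k then (k, PySem.List.sorted v (fun v => v) false) else q) := by
      rw [hd', PySem.Dict.modify, hget, PySem.Dict.items_insert_of_contains _ _ hc]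
    have hkeys' : d'.keys = d.keys := by
      show d'.items.map _ = d.items.map _
      rw [hitems', List.map_map]
      apply List.map_congr_left
      intro q hq
      by_cases h : q.1 = k <;> simp [h]
    rw [List.foldl_cons, ih d' (by rw [hkeys']; exact hnd) hksnd.of_cons
        (fun k' hk' => by rw [hkeys']; exact hsub k' (List.mem_cons_of_mem _ hk')), hitems', List.map_map]
    apply List.map_congr_left
    intro q hq
    have hknt : k ∉ t := (List.nodup_cons.mp hksnd).1
    by_cases h : q.1 = k
    · have hqv : q.2 = v := by
        have := PySem.Dict.get?_of_mem_items _ hv hnd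
        have h2 := PySem.Dict.get?_of_mem_items _ (show (q.1, q.2) ∈ d.items from hq) hnd
        rw [h] at h2; rw [this] at h2
        exact (Option.some.inj h2).symm
      simp [h, hknt, hqv]
    · simp only [Function.comp_def, beq_iff_eq, h, if_false, List.mem_cons]
      by_cases h2 : q.1 ∈ t <;> simp [h2]

theorem map_sort_grp (points : List (Int × Int)) :
    (grp points).map (fun q => (q.1, PySem.List.sorted q.2 (fun v => v) false)) =
      (PySem.List.dedup (points.map (fun p => p.1))).map
        (fun x => (x, PySem.List.sorted ((points.filter (fun p => p.1 == x)).map (fun p => p.2)) (fun v => v) false)) := by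
  simp [grp, List.map_map, Function.comp_def, gather]

theorem swap_filter_map (points : List (Int × Int)) (y : Int) :
    ((points.map Prod.swap).filter (fun q => q.1 == y)).map (fun q => q.2) =
      (points.filter (fun p => p.2 == y)).map (fun p => p.1) := by
  rw [List.filter_map, List.map_map]
  rfl

-- one full side: fold + key sort + per-key sort equals B's comprehension
theorem side_eq (l : List (Int × Int)) :
    ((PySem.List.sorted (l.foldl halfStep (PySem.Dict.empty, [])).2 (fun x => x) false).foldl
        (fun d k => d.modify k [] (fun l => PySem.List.sorted l (fun v => v) false))
        (l.foldl halfStep (PySem.Dict.empty, [])).1).items =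
      (PySem.List.dedup (l.map (fun p => p.1))).map
        (fun x => (x, PySem.List.sorted ((l.filter (fun p => p.1 == x)).map (fun p => p.2)) (fun v => v) false)) := by
  rw [halfStep_fold]
  set xs := PySem.List.dedup (l.map (fun p => p.1)) with hxs
  have hnd : (PySem.Dict.mk (grp l)).keys.Nodup := by rw [keys_grp]; exact PySem.List.nodup_dedup _
  have hperm : (PySem.List.sorted xs (fun x => x) false).Perm xs := PySem.List.sorted_perm _ _ _
  rw [foldl_modify_sort _ _ hnd (hperm.nodup_iff.mpr (hxs ▸ PySem.List.nodup_dedup _))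
      (fun k hk => by rw [keys_grp]; exact hperm.mem_iff.mp hk)]
  rw [← map_sort_grp]
  apply List.map_congr_left
  intro q hq
  have : q.1 ∈ xs := by
    have : q.1 ∈ (PySem.Dict.mk (grp l)).keys := List.mem_map.mpr ⟨q, hq, rfl⟩
    rwa [keys_grp] at this
  simp [hperm.mem_iff.mpr this]

-- ===== VERDICT (by name: the statement is the Claim_ definition above) =====
theorem pointMap_spec : Claim_equal_pointMap := by
  intro points _
  show pointMap points = pointMap_alt points
  unfold pointMap pointMap_alt
  rw [foldl_pointMapStep_eq]
  refine Prod.ext ?_ (Prod.ext ?_ (Prod.ext ?_ ?_))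
  · exact side_eq points
  · show PySem.List.sorted (points.foldl halfStep (PySem.Dict.empty, [])).2 _ _ = _
    rw [halfStep_fold]
  · have := side_eq (points.map Prod.swap)
    simp only [List.map_map, Function.comp_def, Prod.fst_swap] at this ⊢
    rw [this]
    apply List.map_congr_left
    intro y _
    rw [show ((points.map Prod.swap).filter (fun q => q.1 == y)).map (fun q => q.2) =
        (points.filter (fun p => p.2 == y)).map (fun p => p.1) from swap_filter_map points y]
  · show PySem.List.sorted ((points.map Prod.swap).foldl halfStep (PySem.Dict.empty, [])).2 _ _ = _
    rw [halfStep_fold]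
    simp [List.map_map, Function.comp_def]
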